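-- pv_equiv track=rewrite | github.com/pawerug210/Sudoku-GA | scripts/Sudoku.py | fillZeros
-- ===== SOURCE A (Python) =====
-- def fillZeros(child, parent):
--     for value in parent:
--         try:
--             emptyPlaceIndex = child.index(0)
--             if value not in child:
--                 child[emptyPlaceIndex] = value
--         except ValueError:
--             break
--     return child
-- ===== SOURCE B (Python) =====
-- def fillZeros(child, parent):
--     present = set(child)
--     quota = child.count(0)
--     fills = []
--     for v in parent:
--         if len(fills) == quota:
--             break
--         if v not in present:
--             present.add(v)
--             fills.append(v)
--     it = iter(fills)
--     return [next(it, v) if v == 0 else v for v in child]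
-- ===== Notes on version B (the rewrite author's own statement) =====
-- stated objective: alternative
-- what changed: B is two staged passes: it first collects the list of fill values (parent values not already present, capped at the number of zeros) and then builds the result by substituting that list into the zeros left-to-right, whereas A interleaves per-parent-value rescans of child (child.index(0) and 'value in child') with in-place writes.
import Mathlib
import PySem

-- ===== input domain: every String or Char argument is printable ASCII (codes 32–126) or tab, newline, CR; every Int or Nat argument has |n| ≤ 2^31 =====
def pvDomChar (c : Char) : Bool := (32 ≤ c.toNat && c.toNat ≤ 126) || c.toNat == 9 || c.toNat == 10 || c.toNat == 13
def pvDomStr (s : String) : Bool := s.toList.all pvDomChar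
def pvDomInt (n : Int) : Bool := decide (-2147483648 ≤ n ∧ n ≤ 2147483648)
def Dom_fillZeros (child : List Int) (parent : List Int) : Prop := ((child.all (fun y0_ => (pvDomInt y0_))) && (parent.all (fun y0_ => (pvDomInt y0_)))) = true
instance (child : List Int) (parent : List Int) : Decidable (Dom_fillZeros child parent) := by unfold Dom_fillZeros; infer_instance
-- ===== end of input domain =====

-- B computes in two staged passes (collect the fill values, then substitute them into the zeros)
-- instead of A's interleaved per-value rescans with in-place writes (objective: alternative).
-- A mutates `child` in place; B returns a fresh list — the equivalence proved here is about the return value.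

-- ===== PORT A =====
def fillZeros (child : List Int) (parent : List Int) : List Int :=
  match parent with
  | [] => child
  | value :: rest =>
    match PySem.List.index? child 0 with
    | none => child                                   -- ValueError: break
    | some emptyPlaceIndex =>
      fillZeros (if child.contains value then child else child.set emptyPlaceIndex value) rest

-- ===== PORT B =====
-- the 'for v in parent' loop of Source B, with its break and its mutable state (present, fills)
def pvFillsLoop (present : PySem.Set Int) (fills : List Int) (quota : Nat) (parent : List Int) : List Int :=
  match parent with
  | [] => fills
  | v :: rest =>
    if fills.length = quota then fills                -- break
    else if !(PySem.Set.contains present v) then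
      pvFillsLoop (PySem.Set.add present v) (fills ++ [v]) quota rest
    else pvFillsLoop present fills quota rest

-- Source B's final comprehension: walk child, each 0 takes the next fill (default: the 0 itself)
def pvSubst (child : List Int) (fills : List Int) : List Int :=
  match child, fills with
  | [], _ => []
  | c :: cs, [] => c :: pvSubst cs []
  | c :: cs, f :: fs => if c = 0 then f :: pvSubst cs fs else c :: pvSubst cs (f :: fs)

def fillZeros_alt (child : List Int) (parent : List Int) : List Int :=
  let present := PySem.Set.ofList child
  let quota := PySem.List.count child 0
  let fills := pvFillsLoop present [] quota parent
  pvSubst child fills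

-- ===== PRECONDITION & SPEC =====
def Spec_fillZeros (child : List Int) (parent : List Int) (out : List Int) : Prop := out = fillZeros_alt child parent
instance (child : List Int) (parent : List Int) (out : List Int) : Decidable (Spec_fillZeros child parent out) := by unfold Spec_fillZeros; infer_instance

-- ===== CLAIM (what is proved, stated in full; the proofs are below) =====
def Claim_equal_fillZeros : Prop := ∀ (child : List Int) (parent : List Int), Dom_fillZeros child parent → Spec_fillZeros child parent (fillZeros child parent)

-- ===== LEMMAS AND PROOFS =====

-- accumulator-free view of B's fills loop: only the NEW fills, with a remaining-slots counter
def pvLoopR (present : PySem.Set Int) (rem : Nat) (parent : List Int) : List Int :=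
  match parent with
  | [] => []
  | v :: rest =>
    if rem = 0 then []
    else if !(PySem.Set.contains present v) then
      v :: pvLoopR (PySem.Set.add present v) (rem - 1) rest
    else pvLoopR present rem rest

theorem pvFillsLoop_eq (parent : List Int) (present : PySem.Set Int) (fills : List Int)
    (quota : Nat) (hle : fills.length ≤ quota) :
    pvFillsLoop present fills quota parent = fills ++ pvLoopR present (quota - fills.length) parent := by
  induction parent generalizing present fills with
  | nil => simp [pvFillsLoop, pvLoopR]
  | cons v rest ih =>
    by_cases hq : fills.length = quota
    · simp [pvFillsLoop, pvLoopR, hq]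
    · have hrem : quota - fills.length ≠ 0 := by omega
      by_cases hc : PySem.Set.contains present v
      · simp only [pvFillsLoop, pvLoopR, if_neg hq, hc, Bool.not_true, Bool.false_eq_true,
          if_false, if_neg hrem]
        exact ih present fills hle
      · have hc' : PySem.Set.contains present v = false := by simpa using hc
        simp only [pvFillsLoop, pvLoopR, if_neg hq, hc', Bool.not_false, if_true, if_neg hrem]
        rw [ih (PySem.Set.add present v) (fills ++ [v]) (by simp; omega)]
        simp only [List.append_assoc, List.singleton_append, List.length_append,
          List.length_singleton, List.cons.injEq, true_and, List.append_cancel_left_eq]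
        congr 1

theorem pvSubst_cons_ne (x : Int) (cs fills : List Int) (hx : x ≠ 0) :
    pvSubst (x :: cs) fills = x :: pvSubst cs fills := by
  cases fills <;> simp [pvSubst, hx]

theorem pvSubst_nil_fills (c : List Int) : pvSubst c [] = c := by
  induction c with
  | nil => rfl
  | cons x xs ih => simp [pvSubst, ih]

theorem pvSubst_append_no_zero (pre ys fills : List Int) (hpre : (0:Int) ∉ pre) :
    pvSubst (pre ++ ys) fills = pre ++ pvSubst ys fills := by
  induction pre generalizing fills with
  | nil => simp
  | cons x xs ih =>
    simp only [List.mem_cons, not_or] at hpre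
    cases fills with
    | nil => rw [pvSubst_nil_fills, pvSubst_nil_fills]
    | cons f fs =>
      rw [List.cons_append, pvSubst_cons_ne _ _ _ (fun h => hpre.1 h.symm), ih _ hpre.2]
      rfl

-- main loop equivalence: A's loop on the current child equals substituting the remaining fills
theorem pvMain (parent c : List Int) (present : PySem.Set Int)
    (hmem : ∀ w : Int, w ≠ 0 → (w ∈ present ↔ w ∈ c))
    (h0 : (0:Int) ∈ c → (0:Int) ∈ present) :
    fillZeros c parent = pvSubst c (pvLoopR present (c.count 0) parent) := by
  induction parent generalizing c present with
  | nil => simp [fillZeros, pvLoopR, pvSubst_nil_fills]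
  | cons v rest ih =>
    by_cases hz : (0:Int) ∈ c
    · have hcount : c.count 0 ≠ 0 := by
        simpa [Nat.pos_iff_ne_zero] using List.count_pos_iff.mpr hz
      obtain ⟨k, hidx⟩ : ∃ k, PySem.List.index? c 0 = some k := by
        rcases Option.isSome_iff_exists.mp ((PySem.List.index?_isSome_iff c 0).mpr hz) with ⟨k, hk⟩
        exact ⟨k, hk⟩
      obtain ⟨pre, suf, hc, hk, hpre⟩ := (PySem.List.index?_eq_some_iff c 0 k).mp hidx
      by_cases hv : v ∈ c
      · -- A skips; B skips too (v ∈ present)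
        have hvp : v ∈ present := by
          by_cases hv0 : v = 0
          · exact hv0 ▸ h0 hz
          · exact (hmem v hv0).mpr hv
        have hcont : c.contains v = true := List.contains_iff_mem.mpr hv
        have hsc : PySem.Set.contains present v = true := by
          simpa [PySem.Set.contains_eq_listContains] using hvp
        simp only [fillZeros, hidx, hcont, if_true, pvLoopR, if_neg hcount, hsc,
          Bool.not_true, Bool.false_eq_true, if_false]
        exact ih c present hmem h0
      · -- A fills the first zero; B records v as a fill
        have hv0 : v ≠ 0 := fun h => hv (h ▸ hz)
        have hvp : v ∉ present := fun h => hv ((hmem v hv0).mp h)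
        have hsc : PySem.Set.contains present v = false := by
          simp [PySem.Set.contains_eq_listContains, hvp]
        have hcont : c.contains v = false := by simp [hv]
        have hset : c.set k v = pre ++ v :: suf := by
          rw [hc, ← hk, List.set_append_right _ _ (le_refl pre.length)]
          simp
        have hcount' : (pre ++ v :: suf).count 0 = c.count 0 - 1 := by
          rw [hc]
          simp [List.count_append, hv0]
        simp only [fillZeros, hidx, hcont, Bool.false_eq_true, if_false, pvLoopR,
          if_neg hcount, hsc, Bool.not_false, if_true]
        rw [hset, ih (pre ++ v :: suf) (PySem.Set.add present v) ?_ ?_, hcount']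
        · rw [hc, pvSubst_append_no_zero _ _ _ hpre, pvSubst_append_no_zero _ _ _ hpre,
            pvSubst_cons_ne _ _ _ hv0]
          simp [pvSubst]
        · intro w hw0
          rw [PySem.Set.mem_add, hmem w hw0, hc]
          simp only [List.mem_append, List.mem_cons]
          constructor
          · rintro ((h | h | h) | h)
            exacts [Or.inl h, absurd h hw0, Or.inr (Or.inr h), Or.inr (Or.inl h)]
          · rintro (h | h | h)
            exacts [Or.inl (Or.inl h), Or.inr h, Or.inl (Or.inr (Or.inr h))]
        · intro _
          rw [PySem.Set.mem_add]
          exact Or.inl (h0 (hc ▸ by simp))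
    · -- no zero left: both break immediately
      have hidx : PySem.List.index? c (0:Int) = none := (PySem.List.index?_eq_none_iff c 0).mpr hz
      have hcount : c.count 0 = 0 := by
        simpa using List.count_eq_zero.mpr hz
      rw [PySem.List.index?_eq_idxOf?] at hidx
      simp [fillZeros, hidx, pvLoopR, hcount, pvSubst_nil_fills]

-- ===== VERDICT (by name: the statement is the Claim_ definition above) =====
theorem fillZeros_spec : Claim_equal_fillZeros := by
  intro child parent _
  unfold Spec_fillZeros
  show fillZeros child parent =
    pvSubst child (pvFillsLoop (PySem.Set.ofList child) [] (PySem.List.count child 0) parent)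
  rw [pvFillsLoop_eq parent (PySem.Set.ofList child) [] _ (Nat.zero_le _)]
  simp only [List.nil_append, List.length_nil, Nat.sub_zero]
  rw [PySem.List.count_eq]
  exact pvMain parent child _ (fun w _ => by rw [PySem.Set.mem_ofList]) (fun h => by rw [PySem.Set.mem_ofList]; exact h)
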